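-- pv_equiv track=rewrite | github.com/saifullah3396/dpdocldm | external/atria/src/atria/data/data_transforms/huggingface_processors.py | _get_subword_start_end
-- ===== SOURCE A (Python) =====
-- def _get_subword_start_end(
--     word_start, word_end, subword_idx2word_idx, sequence_ids
-- ):
--     ## find the separator between the questions and the text
--     start_of_context = -1
--     for i in range(len(sequence_ids)):
--         if sequence_ids[i] == 1:
--             start_of_context = i
--             break
--     num_question_tokens = start_of_context
--     assert start_of_context != -1, "Could not find the start of the context"
--     subword_start = -1
--     subword_end = -1
--     for i in range(start_of_context, len(subword_idx2word_idx)):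
--         if word_start == subword_idx2word_idx[i] and subword_start == -1:
--             subword_start = i
--         if word_end == subword_idx2word_idx[i]:
--             subword_end = i
--     return subword_start, subword_end, num_question_tokens
-- ===== SOURCE B (Python) =====
-- def _get_subword_start_end(
--     word_start, word_end, subword_idx2word_idx, sequence_ids
-- ):
--     # find the separator between the questions and the text
--     try:
--         start_of_context = sequence_ids.index(1)
--     except ValueError:
--         raise AssertionError("Could not find the start of the context")
--     n = len(subword_idx2word_idx)
--     subword_start = -1
--     for i in range(start_of_context, n):
--         if subword_idx2word_idx[i] == word_start:
--             subword_start = i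
--             break
--     subword_end = -1
--     for i in range(n - 1, start_of_context - 1, -1):
--         if subword_idx2word_idx[i] == word_end:
--             subword_end = i
--             break
--     return subword_start, subword_end, start_of_context
-- ===== Notes on version B (the rewrite author's own statement) =====
-- stated objective: alternative
-- what changed: Replaces A's single stateful forward pass (tracking first word_start match and overwriting the last word_end match) with list.index for the context start plus two independent directional scans that break on first hit: a forward scan for subword_start and a backward scan for subword_end.
import Mathlib
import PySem

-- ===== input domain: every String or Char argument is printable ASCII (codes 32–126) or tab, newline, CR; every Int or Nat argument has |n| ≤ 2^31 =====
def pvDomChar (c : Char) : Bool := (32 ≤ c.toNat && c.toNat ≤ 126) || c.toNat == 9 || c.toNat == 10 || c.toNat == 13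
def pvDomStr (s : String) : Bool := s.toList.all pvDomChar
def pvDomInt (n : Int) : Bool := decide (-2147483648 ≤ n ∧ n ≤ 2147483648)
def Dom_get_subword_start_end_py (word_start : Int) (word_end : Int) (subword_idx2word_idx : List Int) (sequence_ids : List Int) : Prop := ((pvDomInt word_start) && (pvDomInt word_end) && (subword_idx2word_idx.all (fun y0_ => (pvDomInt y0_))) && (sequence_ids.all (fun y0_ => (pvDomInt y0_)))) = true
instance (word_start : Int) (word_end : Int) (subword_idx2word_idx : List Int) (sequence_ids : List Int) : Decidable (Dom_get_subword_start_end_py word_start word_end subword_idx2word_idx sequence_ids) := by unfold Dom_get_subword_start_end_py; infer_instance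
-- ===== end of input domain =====

-- B replaces A's single stateful pass (first-match and last-match flags carried together) by
-- list.index for the context start plus two independent break-on-first-hit scans, forward for
-- subword_start and backward for subword_end (objective: alternative decomposition, same cost).

-- ===== PORT A =====
-- 'for i in range(len(sequence_ids)): if sequence_ids[i] == 1: start_of_context = i; break'
def pvA_findCtx : List Int → Int → Int
  | [], _ => -1
  | x :: rest, i => if x = 1 then i else pvA_findCtx rest (i + 1)

-- 'for i in range(start_of_context, len(subword_idx2word_idx)): …' carrying (subword_start, subword_end)
def pvA_loop (ws we : Int) : List Int → Int → Int × Int → Int × Int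
  | [], _, st => st
  | x :: rest, i, (ss, se) =>
      pvA_loop ws we rest (i + 1)
        ((if ws = x ∧ ss = -1 then i else ss), (if we = x then i else se))

def get_subword_start_end_py (word_start : Int) (word_end : Int) (subword_idx2word_idx : List Int) (sequence_ids : List Int) : Int × Int × Int :=
  let c := pvA_findCtx sequence_ids 0
  if c = -1 then (-1, -1, -1)  -- Python raises AssertionError here; outside Pre_
  else
    let r := pvA_loop word_start word_end (subword_idx2word_idx.drop c.toNat) c (-1, -1)
    (r.1, r.2, c)

-- ===== PORT B =====
-- forward scan with break: 'for i in range(start_of_context, n): if xs[i] == word_start: …; break'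
def pvB_fwd (ws : Int) : List Int → Int → Int
  | [], _ => -1
  | x :: rest, i => if x = ws then i else pvB_fwd ws rest (i + 1)

-- backward scan with break: 'for i in range(n - 1, start_of_context - 1, -1): …; break'
def pvB_bwd (we : Int) : List Int → Int → Int
  | [], _ => -1
  | x :: rest, i => if x = we then i else pvB_bwd we rest (i - 1)

def get_subword_start_end_py_alt (word_start : Int) (word_end : Int) (subword_idx2word_idx : List Int) (sequence_ids : List Int) : Int × Int × Int :=
  match PySem.List.index? sequence_ids 1 with
  | none => (-1, -1, -1)  -- Python raises AssertionError here; outside Pre_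
  | some c =>
      let tail := subword_idx2word_idx.drop c
      let ss := pvB_fwd word_start tail (c : Int)
      let se := pvB_bwd word_end tail.reverse ((c : Int) + tail.length - 1)
      (ss, se, (c : Int))

-- ===== PRECONDITION & SPEC =====
-- Pre_ excludes exactly the inputs where 1 never occurs in sequence_ids: there A's assert raises
-- AssertionError (and B raises the same), so no value is returned.
def Pre_get_subword_start_end_py (word_start : Int) (word_end : Int) (subword_idx2word_idx : List Int) (sequence_ids : List Int) : Prop := (1 : Int) ∈ sequence_ids
instance (word_start : Int) (word_end : Int) (subword_idx2word_idx : List Int) (sequence_ids : List Int) : Decidable (Pre_get_subword_start_end_py word_start word_end subword_idx2word_idx sequence_ids) := by unfold Pre_get_subword_start_end_py; infer_instance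

def pvWitness_get_subword_start_end_py : Int × Int × List Int × List Int := (0, 1, [0, 0, 1, 1], [0, 1, 1, 1])

def Spec_get_subword_start_end_py (word_start : Int) (word_end : Int) (subword_idx2word_idx : List Int) (sequence_ids : List Int) (out : Int × Int × Int) : Prop := out = get_subword_start_end_py_alt word_start word_end subword_idx2word_idx sequence_ids
instance (word_start : Int) (word_end : Int) (subword_idx2word_idx : List Int) (sequence_ids : List Int) (out : Int × Int × Int) : Decidable (Spec_get_subword_start_end_py word_start word_end subword_idx2word_idx sequence_ids out) := by unfold Spec_get_subword_start_end_py; infer_instance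

-- ===== CLAIM (what is proved, stated in full; the proofs are below) =====
def Claim_equal_get_subword_start_end_py : Prop := ∀ (word_start : Int) (word_end : Int) (subword_idx2word_idx : List Int) (sequence_ids : List Int), Dom_get_subword_start_end_py word_start word_end subword_idx2word_idx sequence_ids → Pre_get_subword_start_end_py word_start word_end subword_idx2word_idx sequence_ids → Spec_get_subword_start_end_py word_start word_end subword_idx2word_idx sequence_ids (get_subword_start_end_py word_start word_end subword_idx2word_idx sequence_ids)

-- ===== LEMMAS AND PROOFS =====

-- A's context-finding loop agrees with list.index
theorem pvA_findCtx_eq (sq : List Int) : ∀ i : Int,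
    pvA_findCtx sq i = match PySem.List.index? sq 1 with
      | none => -1
      | some k => i + (k : Int) := by
  induction sq with
  | nil => intro i; simp [pvA_findCtx, PySem.List.index?]
  | cons x rest ih =>
    intro i
    by_cases hx : x = 1
    · subst hx
      rw [PySem.List.index?_cons_self]
      simp [pvA_findCtx]
    · rw [PySem.List.index?_cons_of_ne rest hx]
      simp only [pvA_findCtx, if_neg hx]
      rw [ih (i + 1)]
      cases h : PySem.List.index? rest 1 with
      | none => simp
      | some k => simp; ring

-- first component of A's loop = B's forward break-scan
theorem pvA_loop_fst (ws we : Int) : ∀ (xs : List Int) (i ss se : Int), 0 ≤ i →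
    (pvA_loop ws we xs i (ss, se)).1 = if ss = -1 then pvB_fwd ws xs i else ss := by
  intro xs
  induction xs with
  | nil => intro i ss se _; simp [pvA_loop, pvB_fwd]
  | cons x rest ih =>
    intro i ss se hi
    simp only [pvA_loop, pvB_fwd]
    rw [ih (i + 1) _ _ (by omega)]
    by_cases hss : ss = -1
    · by_cases hx : ws = x
      · simp [hss, hx, eq_comm]
        omega
      · have hx' : ¬ x = ws := fun h => hx h.symm
        simp [hss, hx, hx']
    · simp [hss]

-- stepping A's loop over an appended last element
theorem pvA_loop_append (ws we x : Int) : ∀ (xs : List Int) (i ss se : Int),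
    pvA_loop ws we (xs ++ [x]) i (ss, se) =
      (let r := pvA_loop ws we xs i (ss, se)
       ((if ws = x ∧ r.1 = -1 then i + (xs.length : Int) else r.1),
        (if we = x then i + (xs.length : Int) else r.2))) := by
  intro xs
  induction xs with
  | nil => intro i ss se; simp [pvA_loop]
  | cons y rest ih =>
    intro i ss se
    simp only [List.cons_append, pvA_loop]
    rw [ih (i + 1)]
    simp only [List.length_cons]
    push_cast
    ring_nf

-- second component of A's loop = B's backward break-scan over the reversed suffix
theorem pvA_loop_snd (ws we : Int) : ∀ (xs : List Int) (i ss se : Int), 0 ≤ i →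
    (pvA_loop ws we xs i (ss, se)).2 =
      (let b := pvB_bwd we xs.reverse (i + (xs.length : Int) - 1)
       if b = -1 then se else b) := by
  intro xs
  induction xs using List.reverseRecOn with
  | nil => intro i ss se _; simp [pvA_loop, pvB_bwd]
  | append_singleton xs x ih =>
    intro i ss se hi
    rw [pvA_loop_append]
    simp only [List.reverse_append, List.reverse_cons, List.reverse_nil, List.nil_append,
      List.cons_append, List.length_append, List.length_cons, List.length_nil, pvB_bwd]
    push_cast
    by_cases hx : we = x
    · subst hx
      simp only [if_true]
      rw [if_neg (by omega : ¬ (i + ((xs.length : Int) + 1) - 1 = -1))]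
      ring
    · have hx' : ¬ x = we := fun h => hx h.symm
      simp only [if_neg hx, if_neg hx']
      rw [ih i ss se hi]
      have h2 : i + ((xs.length : Int) + 1) - 1 - 1 = i + (xs.length : Int) - 1 := by ring
      rw [h2]

-- ===== VERDICT (by name: the statement is the Claim_ definition above) =====
theorem get_subword_start_end_py_spec : Claim_equal_get_subword_start_end_py := by
  intro ws we sw sq _ hpre
  unfold Spec_get_subword_start_end_py
  unfold Pre_get_subword_start_end_py at hpre
  obtain ⟨k, hk⟩ := Option.isSome_iff_exists.mp ((PySem.List.index?_isSome_iff sq 1).mpr hpre)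
  unfold get_subword_start_end_py get_subword_start_end_py_alt
  rw [hk]
  rw [pvA_findCtx_eq sq 0, hk]
  simp only [zero_add]
  have hc : ¬ ((k : Int) = -1) := by omega
  rw [if_neg hc]
  have htn : ((k : Int)).toNat = k := by omega
  rw [htn]
  have h0 : (0 : Int) ≤ (k : Int) := Int.natCast_nonneg k
  rw [pvA_loop_fst ws we (sw.drop k) _ _ _ h0, pvA_loop_snd ws we (sw.drop k) _ _ _ h0]
  simp only [List.length_drop]
  by_cases hb : pvB_bwd we (sw.drop k).reverse ((k : Int) + ((sw.length - k : Nat) : Int) - 1) = -1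
  · simp [hb]
  · simp [hb]
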